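-- pv_equiv track=rewrite | github.com/eanorambuena/EngineFromScratch | example.py | tablero
-- ===== SOURCE A (Python) =====
-- def tablero(x, colors):
--     m = []
--     assert x % 2 == 0
--     mid = int(x / 2)
--     for j in range(mid):
--         f = []
--         for i in range(mid):
--             f.append(colors[0])
--             f.append(colors[1])
--         m.append(f)
--         f = []
--         for i in range(mid):
--             f.append(colors[2])
--             f.append(colors[3])
--         m.append(f)
--
--     return  m
-- ===== SOURCE B (Python) =====
-- def tablero(x, colors):
--     # Same board, built cell-wise from row/column parity instead of pair-appending loops.
--     assert x % 2 == 0
--     return [[colors[(r % 2) * 2 + c % 2] for c in range(x)] for r in range(x)]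
-- ===== Notes on version B (the rewrite author's own statement) =====
-- stated objective: idiomatic
-- what changed: Replaces the mid-based nested pair-appending loops with a single coordinate-indexed comprehension computing each cell directly from its row/column parity.
import Mathlib
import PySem

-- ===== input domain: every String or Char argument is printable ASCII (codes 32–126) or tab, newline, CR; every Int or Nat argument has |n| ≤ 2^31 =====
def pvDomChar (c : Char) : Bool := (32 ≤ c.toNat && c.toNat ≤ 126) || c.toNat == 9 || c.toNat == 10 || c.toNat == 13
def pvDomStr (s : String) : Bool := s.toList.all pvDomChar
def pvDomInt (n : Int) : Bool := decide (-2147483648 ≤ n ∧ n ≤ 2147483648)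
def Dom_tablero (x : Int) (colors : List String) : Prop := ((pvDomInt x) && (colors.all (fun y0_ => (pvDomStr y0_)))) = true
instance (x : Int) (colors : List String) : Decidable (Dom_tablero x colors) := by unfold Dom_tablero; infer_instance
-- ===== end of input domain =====

-- B builds the same x-by-x board cell-wise from row/column parity instead of A's mid-based pair-appending loops (idiomatic rewrite, same cost).


-- ===== PORT A =====
def tablero (x : Int) (colors : List String) : List (List String) :=
  let m : List (List String) := []
  -- assert x % 2 == 0 : odd x raises AssertionError, excluded by Pre_
  let mid := PySem.Int.truncdiv x 2   -- int(x / 2): exact on Dom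
  (PySem.List.pyRange 0 mid 1).foldl (fun m _ =>
    let f : List String := []
    let f := (PySem.List.pyRange 0 mid 1).foldl
      (fun f _ => (f ++ [PySem.List.pyGetD colors 0 ""]) ++ [PySem.List.pyGetD colors 1 ""]) f
    let m := m ++ [f]
    let f : List String := []
    let f := (PySem.List.pyRange 0 mid 1).foldl
      (fun f _ => (f ++ [PySem.List.pyGetD colors 2 ""]) ++ [PySem.List.pyGetD colors 3 ""]) f
    m ++ [f]) m

-- ===== PORT B =====
def tablero_alt (x : Int) (colors : List String) : List (List String) :=
  -- assert x % 2 == 0 : odd x raises AssertionError, excluded by Pre_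
  (PySem.List.pyRange 0 x 1).map (fun r =>
    (PySem.List.pyRange 0 x 1).map (fun c =>
      PySem.List.pyGetD colors (PySem.Int.mod r 2 * 2 + PySem.Int.mod c 2) ""))

-- ===== PRECONDITION & SPEC =====
-- Pre_ excludes odd x (the assert raises AssertionError) and positive x with fewer than 4 colors
-- (colors[3], or an earlier index, raises IndexError in both programs).
def Pre_tablero (x : Int) (colors : List String) : Prop :=
  PySem.Int.mod x 2 = 0 ∧ (x ≤ 0 ∨ 4 ≤ (colors.length : Int))
instance (x : Int) (colors : List String) : Decidable (Pre_tablero x colors) := by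
  unfold Pre_tablero; infer_instance
def pvWitness_tablero : Int × List String := (4, ["r", "g", "b", "y"])

def Spec_tablero (x : Int) (colors : List String) (out : List (List String)) : Prop := out = tablero_alt x colors
instance (x : Int) (colors : List String) (out : List (List String)) : Decidable (Spec_tablero x colors out) := by unfold Spec_tablero; infer_instance

-- ===== CLAIM (what is proved, stated in full; the proofs are below) =====
def Claim_equal_tablero : Prop := ∀ (x : Int) (colors : List String), Dom_tablero x colors → Pre_tablero x colors → Spec_tablero x colors (tablero x colors)

-- ===== LEMMAS AND PROOFS =====

-- a fold that appends the same block each step builds init ++ (length copies of the block)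
theorem foldl_app {α : Type} (p : List α) :
    ∀ (l : List Int) (init : List α),
      l.foldl (fun acc _ => acc ++ p) init = init ++ (List.replicate l.length p).flatten := by
  intro l
  induction l with
  | nil => simp
  | cons a t ih => intro init; simp [List.foldl_cons, ih, List.replicate_succ]

-- mapping a parity-determined function over range(0, 2k) yields k copies of the pair [a, b]
theorem map_parity {α : Type} (f : Int → α) (a b : α)
    (hf : ∀ r : Int, 0 ≤ r → f r = if PySem.Int.mod r 2 = 0 then a else b) :
    ∀ k : Nat, (PySem.List.pyRange 0 (2 * (k : Int)) 1).map f = (List.replicate k [a, b]).flatten := by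
  intro k
  induction k with
  | zero => simp [PySem.List.pyRange_one_eq_nil]
  | succ n ih =>
    have h1 : (2 : Int) * ((n : Int) + 1) = (2 * (n : Int) + 1) + 1 := by ring
    have e1 := PySem.List.pyRange_one_succ_right (a := 0) (b := 2 * (n : Int) + 1) (by omega)
    have e2 := PySem.List.pyRange_one_succ_right (a := 0) (b := 2 * (n : Int)) (by omega)
    have hfa : f (2 * (n : Int)) = a := by
      rw [hf _ (by omega)]
      have : PySem.Int.mod (2 * (n : Int)) 2 = 0 := by
        rw [PySem.Int.mod_eq_emod_of_pos (by omega : (0:Int) < 2)]; omega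
      rw [this]; simp
    have hfb : f (2 * (n : Int) + 1) = b := by
      rw [hf _ (by omega)]
      have : PySem.Int.mod (2 * (n : Int) + 1) 2 = 1 := by
        rw [PySem.Int.mod_eq_emod_of_pos (by omega : (0:Int) < 2)]; omega
      rw [this]; simp
    push_cast
    rw [h1, e1, e2]
    simp [ih, hfa, hfb, List.replicate_succ']

theorem tablero_eq_alt (x : Int) (colors : List String)
    (hpre : Pre_tablero x colors) : tablero x colors = tablero_alt x colors := by
  obtain ⟨heven, _⟩ := hpre
  rw [PySem.Int.mod_eq_emod_of_pos (by norm_num : (0:Int) < 2)] at heven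
  by_cases hx : x ≤ 0
  · -- both ranges are empty
    have h1 : PySem.Int.truncdiv x 2 ≤ 0 := by
      obtain ⟨m, hm⟩ : ∃ m : Int, x = 2 * m := ⟨x / 2, by omega⟩
      have : PySem.Int.truncdiv x 2 = m := by
        simp [PySem.Int.truncdiv, hm, Int.mul_tdiv_cancel_left _ (by norm_num : (2:Int) ≠ 0)]
      omega
    simp [tablero, tablero_alt, PySem.List.pyRange_one_eq_nil h1,
      PySem.List.pyRange_one_eq_nil hx]
  · -- x = 2k with k > 0
    obtain ⟨k, hk⟩ : ∃ k : Nat, x = 2 * (k : Int) := by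
      refine ⟨(x / 2).toNat, ?_⟩; omega
    have hmid : PySem.Int.truncdiv x 2 = (k : Int) := by
      simp [hk, PySem.Int.truncdiv]
    set c0 := PySem.List.pyGetD colors 0 "" with hc0
    set c1 := PySem.List.pyGetD colors 1 "" with hc1
    set c2 := PySem.List.pyGetD colors 2 "" with hc2
    set c3 := PySem.List.pyGetD colors 3 "" with hc3
    -- A's two inner rows
    have hrowA : ∀ init : List String,
        (PySem.List.pyRange 0 (k : Int) 1).foldl
          (fun f _ => (f ++ [c0]) ++ [c1]) init = init ++ (List.replicate k [c0, c1]).flatten := by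
      intro init
      have := foldl_app [c0, c1] (PySem.List.pyRange 0 (k : Int) 1) init
      simp only [PySem.List.length_pyRange_one] at this
      simpa [List.append_assoc] using this
    have hrowB : ∀ init : List String,
        (PySem.List.pyRange 0 (k : Int) 1).foldl
          (fun f _ => (f ++ [c2]) ++ [c3]) init = init ++ (List.replicate k [c2, c3]).flatten := by
      intro init
      have := foldl_app [c2, c3] (PySem.List.pyRange 0 (k : Int) 1) init
      simp only [PySem.List.length_pyRange_one] at this
      simpa [List.append_assoc] using this
    -- A as k copies of the row pair
    have hA : tablero x colors
        = (List.replicate k [(List.replicate k [c0, c1]).flatten,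
                             (List.replicate k [c2, c3]).flatten]).flatten := by
      show (PySem.List.pyRange 0 (PySem.Int.truncdiv x 2) 1).foldl _ _ = _
      rw [hmid]
      have := foldl_app
        [(List.replicate k [c0, c1]).flatten, (List.replicate k [c2, c3]).flatten]
        (PySem.List.pyRange 0 (k : Int) 1) ([] : List (List String))
      rw [show (fun (m : List (List String)) (_ : Int) =>
            ((m ++ [(PySem.List.pyRange 0 (k:Int) 1).foldl (fun f _ => (f ++ [c0]) ++ [c1]) []])
              ++ [(PySem.List.pyRange 0 (k:Int) 1).foldl (fun f _ => (f ++ [c2]) ++ [c3]) []]))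
          = (fun (m : List (List String)) (_ : Int) =>
              m ++ [(List.replicate k [c0, c1]).flatten, (List.replicate k [c2, c3]).flatten])
        from by funext m i; rw [hrowA, hrowB]; simp]
      simp only [PySem.List.length_pyRange_one] at this
      exact this
    -- B's rows, by parity
    have hEvenRow : ∀ r : Int, 0 ≤ r → PySem.Int.mod r 2 = 0 →
        (PySem.List.pyRange 0 x 1).map
          (fun c => PySem.List.pyGetD colors (PySem.Int.mod r 2 * 2 + PySem.Int.mod c 2) "")
        = (List.replicate k [c0, c1]).flatten := by
      intro r _ hr
      rw [hk]
      exact map_parity _ c0 c1 (by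
        intro c hc
        rw [hr]
        by_cases h : PySem.Int.mod c 2 = 0
        · rw [h, if_pos rfl, hc0]; norm_num
        · have h1 : PySem.Int.mod c 2 = 1 := by
            have h1 := PySem.Int.mod_nonneg c (by omega : (0:Int) < 2)
            have h2 := PySem.Int.mod_lt c (by omega : (0:Int) < 2)
            omega
          rw [h1, if_neg (by norm_num : ¬(1:Int) = 0), hc1]; norm_num) k
    have hOddRow : ∀ r : Int, 0 ≤ r → PySem.Int.mod r 2 = 1 →
        (PySem.List.pyRange 0 x 1).map
          (fun c => PySem.List.pyGetD colors (PySem.Int.mod r 2 * 2 + PySem.Int.mod c 2) "")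
        = (List.replicate k [c2, c3]).flatten := by
      intro r _ hr
      rw [hk]
      exact map_parity _ c2 c3 (by
        intro c hc
        rw [hr]
        by_cases h : PySem.Int.mod c 2 = 0
        · rw [h, if_pos rfl, hc2]; norm_num
        · have h1 : PySem.Int.mod c 2 = 1 := by
            have h1 := PySem.Int.mod_nonneg c (by omega : (0:Int) < 2)
            have h2 := PySem.Int.mod_lt c (by omega : (0:Int) < 2)
            omega
          rw [h1, if_neg (by norm_num : ¬(1:Int) = 0), hc3]; norm_num) k
    have hB : tablero_alt x colors
        = (List.replicate k [(List.replicate k [c0, c1]).flatten,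
                             (List.replicate k [c2, c3]).flatten]).flatten := by
      show (PySem.List.pyRange 0 x 1).map _ = _
      conv_lhs => rw [hk]
      refine map_parity _ _ _ ?_ k
      intro r hrpos
      by_cases h : PySem.Int.mod r 2 = 0
      · rw [if_pos h, ← hk]; exact hEvenRow r hrpos h
      · have h1 : PySem.Int.mod r 2 = 1 := by
          have h1 := PySem.Int.mod_nonneg r (by omega : (0:Int) < 2)
          have h2 := PySem.Int.mod_lt r (by omega : (0:Int) < 2)
          omega
        rw [if_neg h, ← hk]; exact hOddRow r hrpos h1
    rw [hA, hB]

-- ===== VERDICT (by name: the statement is the Claim_ definition above) =====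
theorem tablero_spec : Claim_equal_tablero := by
  intro x colors _ hpre
  exact tablero_eq_alt x colors hpre
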